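-- pv_equiv track=rewrite | github.com/Bwiza-dalia/math-mind-grader | src/step_parser.py | _split_by_equations
-- ===== SOURCE A (Python) =====
-- from typing import List
--
-- def _split_by_equations(text: str) -> List[str]:
--     """Split text by equations (lines with =)."""
--     # Split by newlines that contain =
--     lines = text.split('\n')
--
--     steps = []
--     current = []
--
--     for line in lines:
--         line = line.strip()
--         if not line:
--             continue
--
--         # If line contains =, it might be a new step
--         if '=' in line and current:
--             steps.append(' '.join(current))
--             current = [line]
--         else:
--             current.append(line)
--
--     if current:
--         steps.append(' '.join(current))
--
--     return steps if len(steps) > 1 else [text]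
-- ===== SOURCE B (Python) =====
-- from typing import List
--
-- def _split_by_equations(text: str) -> List[str]:
--     """Split text by equations (lines with =): boundary-index two-pass version."""
--     cleaned = [s for s in (ln.strip() for ln in text.split('\n')) if s]
--     bounds = [i for i, ln in enumerate(cleaned) if i == 0 or '=' in ln]
--     ends = bounds[1:] + [len(cleaned)]
--     steps = [' '.join(cleaned[b:e]) for b, e in zip(bounds, ends)]
--     return steps if len(steps) > 1 else [text]
-- ===== Notes on version B (the rewrite author's own statement) =====
-- stated objective: alternative
-- what changed: A streams lines through one loop carrying a (finished steps, current buffer) state with an end-of-loop flush; B first builds the cleaned line list, then collects boundary indices (index 0 plus later '='-lines), and slices the cleaned list between consecutive boundaries, joining each slice.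
import Mathlib
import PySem

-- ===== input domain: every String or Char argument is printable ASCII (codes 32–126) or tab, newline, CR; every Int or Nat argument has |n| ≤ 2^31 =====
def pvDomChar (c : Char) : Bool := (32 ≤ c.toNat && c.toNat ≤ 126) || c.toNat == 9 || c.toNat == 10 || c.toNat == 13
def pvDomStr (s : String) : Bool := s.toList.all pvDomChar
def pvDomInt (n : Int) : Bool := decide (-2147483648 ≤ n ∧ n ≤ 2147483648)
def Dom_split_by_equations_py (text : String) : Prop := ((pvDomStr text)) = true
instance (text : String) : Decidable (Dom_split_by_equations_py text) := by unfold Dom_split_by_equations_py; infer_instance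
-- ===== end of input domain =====

-- B replaces A's single streaming loop (finished steps + current buffer + final flush) by a
-- two-pass boundary-index decomposition: clean the lines, collect split indices, slice and join.

-- ===== PORT A =====
def split_by_equations_py (text : String) : List String :=
  let lines := (PySem.Str.split? text "\n").getD []
  let st := lines.foldl
    (fun (st : List String × List String) line =>
      let line := PySem.Str.strip line
      if line = "" then st
      else if PySem.Str.isIn "=" line && !st.2.isEmpty then
        (st.1 ++ [PySem.Str.join " " st.2], [line])
      else (st.1, st.2 ++ [line])) ([], [])
  let steps := if !st.2.isEmpty then st.1 ++ [PySem.Str.join " " st.2] else st.1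
  if steps.length > 1 then steps else [text]

-- ===== PORT B =====
def split_by_equations_py_alt (text : String) : List String :=
  let cleaned := (((PySem.Str.split? text "\n").getD []).map PySem.Str.strip).filter
    (fun s => s ≠ "")
  let bounds := ((PySem.List.enumerate cleaned).filter
    (fun p => p.1 == 0 || PySem.Str.isIn "=" p.2)).map Prod.fst
  let ends := bounds.tail ++ [(cleaned.length : Int)]
  let steps := (bounds.zip ends).map
    (fun p => PySem.Str.join " " (PySem.List.slice cleaned (some p.1) (some p.2)))
  if steps.length > 1 then steps else [text]

-- ===== PRECONDITION & SPEC =====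
def Spec_split_by_equations_py (text : String) (out : List String) : Prop := out = split_by_equations_py_alt text
instance (text : String) (out : List String) : Decidable (Spec_split_by_equations_py text out) := by unfold Spec_split_by_equations_py; infer_instance

-- ===== CLAIM (what is proved, stated in full; the proofs are below) =====
def Claim_equal_split_by_equations_py : Prop := ∀ (text : String), Dom_split_by_equations_py text → Spec_split_by_equations_py text (split_by_equations_py text)

-- ===== LEMMAS AND PROOFS =====

def sbeHas (l : String) : Bool := PySem.Str.isIn "=" l

def sbeJoin (g : List String) : String := PySem.Str.join " " g

def sbeStep (st : List String × List String) (l : String) : List String × List String :=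
  if sbeHas l && !st.2.isEmpty then (st.1 ++ [sbeJoin st.2], [l]) else (st.1, st.2 ++ [l])

def sbeStepRaw (st : List String × List String) (line : String) : List String × List String :=
  if PySem.Str.strip line = "" then st else sbeStep st (PySem.Str.strip line)

def sbeFin (st : List String × List String) : List String :=
  if !st.2.isEmpty then st.1 ++ [sbeJoin st.2] else st.1

def sbeCleaned (lines : List String) : List String :=
  (lines.map PySem.Str.strip).filter (fun s => s ≠ "")

def sbeGo (cur : List String) : List String → List (List String)
  | [] => [cur]
  | l :: t => if sbeHas l then cur :: sbeGo [l] t else sbeGo (cur ++ [l]) t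

def sbeGrps : List String → List (List String)
  | [] => []
  | c :: ls => sbeGo [c] ls

def sbeBnds (c : List String) : List Int :=
  ((PySem.List.enumerate c).filter (fun p => p.1 == 0 || sbeHas p.2)).map Prod.fst

def sbeSL (c : List String) : List (List String) :=
  ((sbeBnds c).zip ((sbeBnds c).tail ++ [(c.length : Int)])).map
    (fun p => PySem.List.slice c (some p.1) (some p.2))

def sbeStepsB (c : List String) : List String :=
  ((sbeBnds c).zip ((sbeBnds c).tail ++ [(c.length : Int)])).map
    (fun p => sbeJoin (PySem.List.slice c (some p.1) (some p.2)))

-- A-side: the streamed fold computes the groups of sbeGo, joined.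
theorem sbeFoldA (rest : List String) (steps cur : List String) (h : cur ≠ []) :
    sbeFin (rest.foldl sbeStep (steps, cur)) = steps ++ (sbeGo cur rest).map sbeJoin := by
  induction rest generalizing steps cur with
  | nil => simp [sbeFin, sbeGo, h]
  | cons l t ih =>
    by_cases hl : sbeHas l = true
    · simp [List.foldl_cons, sbeStep, hl, h, sbeGo,
        ih (steps ++ [sbeJoin cur]) [l] (by simp)]
    · simp [List.foldl_cons, sbeStep, hl, sbeGo,
        ih steps (cur ++ [l]) (by simp)]

theorem sbeA (c : List String) :
    sbeFin (c.foldl sbeStep ([], [])) = (sbeGrps c).map sbeJoin := by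
  cases c with
  | nil => simp [sbeFin, sbeGrps]
  | cons c0 ls =>
    have h0 : sbeStep ([], []) c0 = ([], [c0]) := by simp [sbeStep]
    simp only [List.foldl_cons, h0, sbeGrps]
    exact sbeFoldA ls [] [c0] (by simp)

-- fold over raw lines (strip + skip inline) = fold over the cleaned list
theorem sbeCleanFold (lines : List String) (init : List String × List String) :
    (sbeCleaned lines).foldl sbeStep init = lines.foldl sbeStepRaw init := by
  unfold sbeCleaned
  rw [List.foldl_filter, List.foldl_map]
  congr 1
  funext st y
  unfold sbeStepRaw
  by_cases h : PySem.Str.strip y = "" <;> simp [h]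

-- boundary lists
theorem sbeBnds_ne_nil (c : List String) (h : c ≠ []) : sbeBnds c ≠ [] := by
  cases c with
  | nil => exact absurd rfl h
  | cons c0 ls => simp [sbeBnds, PySem.List.enumerate_cons]

theorem sbeBnds_mem (c : List String) (b : Int) (hb : b ∈ sbeBnds c) :
    0 ≤ b ∧ b < (c.length : Int) := by
  simp only [sbeBnds, List.mem_map, List.mem_filter] at hb
  obtain ⟨p, ⟨hp, _⟩, rfl⟩ := hb
  rw [PySem.List.mem_enumerate_iff] at hp
  obtain ⟨k, hk, rfl⟩ := hp
  simp; omega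

theorem sbeBnds_snoc (xs : List String) (x : String) :
    sbeBnds (xs ++ [x]) =
      sbeBnds xs ++ (if ((xs.length : Int) == 0 || sbeHas x) then [(xs.length : Int)] else []) := by
  simp only [sbeBnds, PySem.List.enumerate_append, List.filter_append, List.map_append]
  congr 1
  simp [PySem.List.enumerate_cons]
  split <;> simp_all

theorem sbeZipTail (bs : List Int) (m : Int) (h : bs ≠ []) :
    bs.zip (bs.tail ++ [m]) = (bs.dropLast.zip bs.tail) ++ [(bs.getLastD 0, m)] := by
  induction bs with
  | nil => exact absurd rfl h
  | cons a t ih =>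
    cases t with
    | nil => simp
    | cons b t' =>
      have h' := ih (by simp)
      simp only [List.tail_cons] at h' ⊢
      simp [List.zip_cons_cons, h', List.dropLast_cons₂]

theorem sbeGetLastD_mem (bs : List Int) (h : bs ≠ []) : bs.getLastD 0 ∈ bs := by
  induction bs with
  | nil => exact absurd rfl h
  | cons a t ih =>
    cases t with
    | nil => simp
    | cons b t' => simpa using Or.inr (ih (by simp))

theorem sbeGetLastD_concat {α : Type} (l : List α) (a d : α) : (l ++ [a]).getLastD d = a := by
  induction l generalizing d with
  | nil => rfl
  | cons b t ih =>
    simp only [List.cons_append, List.getLastD_cons]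
    exact ih b

-- slices against a snoc
theorem sbeSlice_frozen (xs : List String) (x : String) (a b : Int)
    (ha : 0 ≤ a) (hb : 0 ≤ b) (hbn : b ≤ (xs.length : Int)) :
    PySem.List.slice (xs ++ [x]) (some a) (some b) = PySem.List.slice xs (some a) (some b) := by
  rw [PySem.List.slice_toNat _ ha hb, PySem.List.slice_toNat _ ha hb]
  by_cases hax : a.toNat ≤ xs.length
  · rw [List.drop_append_of_le_length hax]
    rw [List.take_append_of_le_length (by simp; omega)]
  · have h1 : xs.drop a.toNat = [] := List.drop_eq_nil_of_le (by omega)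
    have h2 : b.toNat - a.toNat = 0 := by omega
    simp [h2]

theorem sbeSlice_last (xs : List String) (x : String) (a : Int)
    (ha : 0 ≤ a) (han : a ≤ (xs.length : Int)) :
    PySem.List.slice (xs ++ [x]) (some a) (some ((xs.length : Int) + 1)) =
      PySem.List.slice xs (some a) (some (xs.length : Int)) ++ [x] := by
  rw [PySem.List.slice_toNat _ ha (by omega), PySem.List.slice_toNat _ ha (by omega)]
  have hax : a.toNat ≤ xs.length := by omega
  rw [List.drop_append_of_le_length hax]
  have hg : (List.drop a.toNat xs).length = xs.length - a.toNat := by simp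
  have h1 : ((xs.length : Int) + 1).toNat - a.toNat = (xs.length - a.toNat) + 1 := by omega
  have h2 : ((xs.length : Int)).toNat - a.toNat = xs.length - a.toNat := by omega
  rw [h1, h2]
  rw [List.take_of_length_le (by simp [hg]), List.take_of_length_le (le_of_eq hg)]

theorem sbeGo_ne_nil (t : List String) (cur : List String) : sbeGo cur t ≠ [] := by
  induction t generalizing cur with
  | nil => simp [sbeGo]
  | cons l t' ih => by_cases hl : sbeHas l = true <;> simp [sbeGo, hl, ih]

theorem sbeGo_snoc (t : List String) (cur : List String) (x : String) :
    sbeGo cur (t ++ [x]) =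
      if sbeHas x then sbeGo cur t ++ [[x]]
      else (sbeGo cur t).dropLast ++ [((sbeGo cur t).getLastD []) ++ [x]] := by
  induction t generalizing cur with
  | nil =>
    by_cases hx : sbeHas x = true
    · simp [sbeGo, hx]
    · rw [Bool.not_eq_true] at hx; simp [sbeGo, hx]
  | cons l t' ih =>
    by_cases hl : sbeHas l = true
    · obtain ⟨g, gs, hg⟩ : ∃ g gs, sbeGo [l] t' = g :: gs := by
        cases hh : sbeGo [l] t' with
        | nil => exact absurd hh (sbeGo_ne_nil t' [l])
        | cons g gs => exact ⟨g, gs, rfl⟩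
      by_cases hx : sbeHas x = true
      · simp [sbeGo, hl, hx, ih]
      · rw [Bool.not_eq_true] at hx
        simp only [List.cons_append, sbeGo, hl, if_true, ih, hx, Bool.false_eq_true,
          if_false]
        rw [hg]
        simp [List.dropLast_cons₂]
    · rw [Bool.not_eq_true] at hl
      simp [sbeGo, hl, ih]

theorem sbeGrps_snoc (xs : List String) (x : String) (h : xs ≠ []) :
    sbeGrps (xs ++ [x]) =
      if sbeHas x then sbeGrps xs ++ [[x]]
      else (sbeGrps xs).dropLast ++ [((sbeGrps xs).getLastD []) ++ [x]] := by
  cases xs with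
  | nil => exact absurd rfl h
  | cons c0 ls => simpa [sbeGrps, List.cons_append] using sbeGo_snoc ls [c0] x

theorem sbeSL_eq (c : List String) : sbeSL c = sbeGrps c := by
  induction c using List.reverseRecOn with
  | nil => rfl
  | append_singleton xs x ih =>
    by_cases hxs : xs = []
    · subst hxs
      rfl
    · have hbs := sbeBnds_ne_nil xs hxs
      have hn : xs.length ≠ 0 := fun hh => hxs (List.eq_nil_of_length_eq_zero hh)
      have hb0 : (((xs.length : Int)) == 0) = false := beq_eq_false_iff_ne.mpr (by exact_mod_cast hn)
      have hsnoc := sbeBnds_snoc xs x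
      simp only [hb0, Bool.false_or] at hsnoc
      have hlen' : (((xs ++ [x]).length : Int)) = (xs.length : Int) + 1 := by
        rw [List.length_append, List.length_singleton]; push_cast; ring
      by_cases hx : sbeHas x = true
      · -- new boundary: a fresh one-line group is appended
        have hbnds' : sbeBnds (xs ++ [x]) = sbeBnds xs ++ [(xs.length : Int)] := by
          rw [hsnoc, if_pos hx]
        have htail : (sbeBnds xs ++ [(xs.length : Int)]).tail = (sbeBnds xs).tail ++ [(xs.length : Int)] := by
          cases hB : sbeBnds xs with
          | nil => exact absurd hB hbs
          | cons a t => simp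
        have hz := sbeZipTail (sbeBnds xs ++ [(xs.length : Int)]) ((xs.length : Int) + 1) (by simp)
        rw [htail, List.dropLast_concat, sbeGetLastD_concat] at hz
        have hlast : PySem.List.slice (xs ++ [x]) (some (xs.length : Int)) (some ((xs.length : Int) + 1)) = [x] := by
          rw [PySem.List.slice_toNat _ (Int.natCast_nonneg _) (by positivity)]
          have h1 : ((xs.length : Int)).toNat = xs.length := by omega
          have h2 : ((xs.length : Int) + 1).toNat - ((xs.length : Int)).toNat = 1 := by omega
          rw [h2, h1, List.drop_left]
          rfl
        have hfst : List.map (fun p : Int × Int => PySem.List.slice (xs ++ [x]) (some p.1) (some p.2))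
              ((sbeBnds xs).zip ((sbeBnds xs).tail ++ [(xs.length : Int)]))
            = sbeSL xs := by
          unfold sbeSL
          refine List.map_congr_left ?_
          rintro ⟨a, b⟩ hp
          obtain ⟨ha, hb⟩ := List.of_mem_zip hp
          have haa := sbeBnds_mem xs a ha
          have hbb : 0 ≤ b ∧ b ≤ (xs.length : Int) := by
            rcases List.mem_append.mp hb with hmem | hmem
            · have := sbeBnds_mem xs b (List.mem_of_mem_tail hmem)
              exact ⟨this.1, le_of_lt this.2⟩
            · simp only [List.mem_singleton] at hmem
              subst hmem
              exact ⟨Int.natCast_nonneg _, le_refl _⟩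
          exact sbeSlice_frozen xs x a b haa.1 hbb.1 hbb.2
        unfold sbeSL
        rw [hbnds', hlen', htail, hz, List.map_append, hfst, ih,
          sbeGrps_snoc xs x hxs, if_pos hx]
        simp [hlast]
      · -- no boundary: the last group is extended by one line
        rw [Bool.not_eq_true] at hx
        have hbnds' : sbeBnds (xs ++ [x]) = sbeBnds xs := by
          rw [hsnoc, if_neg (by simp [hx]), List.append_nil]
        have hz := sbeZipTail (sbeBnds xs) ((xs.length : Int) + 1) hbs
        have hz0 := sbeZipTail (sbeBnds xs) (xs.length : Int) hbs
        have hLmem := sbeGetLastD_mem (sbeBnds xs) hbs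
        have hLb := sbeBnds_mem xs _ hLmem
        have hSLxs : sbeSL xs =
            List.map (fun p : Int × Int => PySem.List.slice xs (some p.1) (some p.2))
              ((sbeBnds xs).dropLast.zip (sbeBnds xs).tail)
            ++ [PySem.List.slice xs (some ((sbeBnds xs).getLastD 0)) (some (xs.length : Int))] := by
          unfold sbeSL
          rw [hz0, List.map_append]
          rfl
        have hfst : List.map (fun p : Int × Int => PySem.List.slice (xs ++ [x]) (some p.1) (some p.2))
              ((sbeBnds xs).dropLast.zip (sbeBnds xs).tail)
            = List.map (fun p : Int × Int => PySem.List.slice xs (some p.1) (some p.2))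
              ((sbeBnds xs).dropLast.zip (sbeBnds xs).tail) := by
          refine List.map_congr_left ?_
          rintro ⟨a, b⟩ hp
          obtain ⟨ha, hb⟩ := List.of_mem_zip hp
          have haa := sbeBnds_mem xs a (List.mem_of_mem_dropLast ha)
          have hbb := sbeBnds_mem xs b (List.mem_of_mem_tail hb)
          exact sbeSlice_frozen xs x a b haa.1 hbb.1 (le_of_lt hbb.2)
        have hlast := sbeSlice_last xs x ((sbeBnds xs).getLastD 0) hLb.1 (le_of_lt hLb.2)
        unfold sbeSL
        rw [hbnds', hlen', hz, List.map_append, hfst,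
          sbeGrps_snoc xs x hxs, if_neg (by simp [hx]), ← ih, hSLxs,
          List.dropLast_concat, sbeGetLastD_concat]
        simp only [List.map_cons, List.map_nil]
        rw [hlast]

theorem sbeMainAux (orig : String) (lines : List String) :
    (if (sbeFin (lines.foldl sbeStepRaw ([], []))).length > 1
     then sbeFin (lines.foldl sbeStepRaw ([], [])) else [orig])
    = (if (sbeStepsB (sbeCleaned lines)).length > 1
       then sbeStepsB (sbeCleaned lines) else [orig]) := by
  have h2 : sbeStepsB (sbeCleaned lines) = (sbeGrps (sbeCleaned lines)).map sbeJoin := by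
    unfold sbeStepsB
    rw [← sbeSL_eq]
    unfold sbeSL
    rw [List.map_map]
    rfl
  rw [← sbeCleanFold, sbeA, h2]

-- ===== VERDICT (by name: the statement is the Claim_ definition above) =====
theorem split_by_equations_py_spec : Claim_equal_split_by_equations_py := by
  intro text _
  show split_by_equations_py text = split_by_equations_py_alt text
  exact sbeMainAux text ((PySem.Str.split? text "\n").getD [])
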